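-- pv_equiv track=rewrite | github.com/slxiao/conport | contport/summary.py | get_merged_reports
-- ===== SOURCE A (Python) =====
-- def get_merged_reports(atom_reports):
--     merged_reports = {}
--     for atom in atom_reports:
--         full_name = '.'.join([atom[1], atom[2]])
--         if full_name not in merged_reports:
--             merged_reports[full_name] = {
--                 'atoms': [(atom[0], atom[3], atom[4])]}
--         else:
--             merged_reports[full_name]['atoms'].append(
--                 (atom[0], atom[3], atom[4]))
--     return merged_reports
-- ===== SOURCE B (Python) =====
-- def get_merged_reports(atom_reports):
--     order = list(dict.fromkeys('.'.join([a[1], a[2]]) for a in atom_reports))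
--     return {k: {'atoms': [(a[0], a[3], a[4])
--                           for a in atom_reports
--                           if '.'.join([a[1], a[2]]) == k]}
--             for k in order}
-- ===== Notes on version B (the rewrite author's own statement) =====
-- stated objective: alternative
-- what changed: Replaces A's single-pass dict building with incremental appends by a two-phase plan: first collect the distinct full names in first-occurrence order (dict.fromkeys), then build each group in one comprehension by filtering the whole input per key.
import Mathlib
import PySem

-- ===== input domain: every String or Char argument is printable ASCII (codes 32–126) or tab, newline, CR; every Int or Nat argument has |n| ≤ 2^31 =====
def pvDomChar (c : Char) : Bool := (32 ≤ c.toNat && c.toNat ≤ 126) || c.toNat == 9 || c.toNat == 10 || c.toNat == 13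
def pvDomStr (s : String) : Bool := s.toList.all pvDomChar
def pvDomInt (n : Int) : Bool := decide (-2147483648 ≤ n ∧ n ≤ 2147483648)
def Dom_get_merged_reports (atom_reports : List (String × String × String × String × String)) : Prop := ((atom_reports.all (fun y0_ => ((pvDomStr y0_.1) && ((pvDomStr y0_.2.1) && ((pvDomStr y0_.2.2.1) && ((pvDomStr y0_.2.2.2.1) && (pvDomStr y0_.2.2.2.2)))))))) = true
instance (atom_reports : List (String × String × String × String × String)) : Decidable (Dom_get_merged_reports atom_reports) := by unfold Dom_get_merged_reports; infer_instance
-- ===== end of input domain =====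

-- B replaces A's single-pass dict build (append to the bucket of each atom's key) by a two-phase
-- plan: dedup the keys in first-occurrence order, then build each group by filtering the input
-- per key (objective: alternative decomposition; not faster).

-- ===== PORT A =====
def get_merged_reports (atom_reports : List (String × String × String × String × String)) : List (String × List (String × List (String × String × String))) :=
  let merged_reports := atom_reports.foldl (fun d atom =>
    let full_name := PySem.Str.join "." [atom.2.1, atom.2.2.1]
    if !(d.contains full_name) then
      d.insert full_name (PySem.Dict.ofList [("atoms", [(atom.1, atom.2.2.2.1, atom.2.2.2.2)])])
    else
      d.modify full_name PySem.Dict.empty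
        (fun inner => inner.modify "atoms" [] (fun l => l ++ [(atom.1, atom.2.2.2.1, atom.2.2.2.2)])))
    PySem.Dict.empty
  merged_reports.items.map (fun p => (p.1, p.2.items))

-- ===== PORT B =====
def get_merged_reports_alt (atom_reports : List (String × String × String × String × String)) : List (String × List (String × List (String × String × String))) :=
  let order := PySem.List.dedup (atom_reports.map (fun a => PySem.Str.join "." [a.2.1, a.2.2.1]))
  order.map (fun k =>
    (k, [("atoms",
          (atom_reports.filter (fun a => PySem.Str.join "." [a.2.1, a.2.2.1] == k)).map
            (fun a => (a.1, a.2.2.2.1, a.2.2.2.2)))]))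

-- ===== PRECONDITION & SPEC =====
def Spec_get_merged_reports (atom_reports : List (String × String × String × String × String)) (out : List (String × List (String × List (String × String × String)))) : Prop := out = get_merged_reports_alt atom_reports
instance (atom_reports : List (String × String × String × String × String)) (out : List (String × List (String × List (String × String × String)))) : Decidable (Spec_get_merged_reports atom_reports out) := by
  unfold Spec_get_merged_reports
  haveI : DecidableEq (List (String × List (String × String × String))) := inferInstance
  haveI : DecidableEq (String × List (String × List (String × String × String))) := instDecidableEqProd
  exact decEq _ _

-- ===== CLAIM (what is proved, stated in full; the proofs are below) =====
def Claim_equal_get_merged_reports : Prop := ∀ (atom_reports : List (String × String × String × String × String)), Dom_get_merged_reports atom_reports → Spec_get_merged_reports atom_reports (get_merged_reports atom_reports)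

-- ===== LEMMAS AND PROOFS =====

def pvKey (a : String × String × String × String × String) : String :=
  PySem.Str.join "." [a.2.1, a.2.2.1]

def pvTup (a : String × String × String × String × String) : String × String × String :=
  (a.1, a.2.2.2.1, a.2.2.2.2)

def pvGrp (xs : List (String × String × String × String × String)) (k : String) : List (String × String × String) :=
  (xs.filter (fun a => pvKey a == k)).map pvTup

def pvItems (xs : List (String × String × String × String × String)) : List (String × PySem.Dict String (List (String × String × String))) :=
  (PySem.List.dedup (xs.map pvKey)).map (fun k => (k, PySem.Dict.mk [("atoms", pvGrp xs k)]))

theorem pvDedup_append_mem {l : List String} {k : String} (h : k ∈ l) :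
    PySem.List.dedup (l ++ [k]) = PySem.List.dedup l := by
  simp only [PySem.List.dedup_eq_ofList, PySem.Set.ofList_append, PySem.Set.update_cons,
    PySem.Set.update_nil]
  simp [PySem.Set.add, PySem.Set.mem_ofList, h]

theorem pvDedup_append_not_mem {l : List String} {k : String} (h : k ∉ l) :
    PySem.List.dedup (l ++ [k]) = PySem.List.dedup l ++ [k] := by
  simp only [PySem.List.dedup_eq_ofList, PySem.Set.ofList_append, PySem.Set.update_cons,
    PySem.Set.update_nil]
  simp [PySem.Set.add, PySem.Set.mem_ofList, h]

theorem pvInnerModify (L : List (String × String × String)) (t : String × String × String) :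
    (PySem.Dict.mk [("atoms", L)]).modify "atoms" [] (fun l => l ++ [t]) = PySem.Dict.mk [("atoms", L ++ [t])] := by
  simp [PySem.Dict.modify, PySem.Dict.insert, PySem.Dict.getD, PySem.Dict.get?]

theorem pvOfListSingleton (t : String × String × String) :
    PySem.Dict.ofList [("atoms", [t])] = PySem.Dict.mk [("atoms", [t])] := rfl

theorem pvGrp_append (ys : List (String × String × String × String × String))
    (a : String × String × String × String × String) (k : String) :
    pvGrp (ys ++ [a]) k = pvGrp ys k ++ (if pvKey a = k then [pvTup a] else []) := by
  simp only [pvGrp, List.filter_append, List.map_append]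
  congr 1
  by_cases h : pvKey a = k
  · simp [List.filter, h]
  · have hb : (pvKey a == k) = false := beq_eq_false_iff_ne.mpr h
    simp [List.filter, hb]
    exact h

theorem pvGrp_nil_of_not_mem {ys : List (String × String × String × String × String)} {k : String}
    (h : k ∉ ys.map pvKey) : pvGrp ys k = [] := by
  have : ys.filter (fun a => pvKey a == k) = [] := by
    rw [List.filter_eq_nil_iff]
    intro a ha hbeq
    exact h (List.mem_map.mpr ⟨a, ha, beq_iff_eq.mp hbeq⟩)
  simp [pvGrp, this]

def pvStep (d : PySem.Dict String (PySem.Dict String (List (String × String × String))))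
    (atom : String × String × String × String × String) :
    PySem.Dict String (PySem.Dict String (List (String × String × String))) :=
  if !(d.contains (pvKey atom)) then
    d.insert (pvKey atom) (PySem.Dict.ofList [("atoms", [pvTup atom])])
  else
    d.modify (pvKey atom) PySem.Dict.empty
      (fun inner => inner.modify "atoms" [] (fun l => l ++ [pvTup atom]))

theorem pvKeys_mk_items (ys : List (String × String × String × String × String)) :
    (PySem.Dict.mk (pvItems ys)).keys = PySem.List.dedup (ys.map pvKey) := by
  simp [pvItems, PySem.Dict.keys, List.map_map, Function.comp_def]

theorem pvNodup_keys (ys : List (String × String × String × String × String)) :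
    (PySem.Dict.mk (pvItems ys)).keys.Nodup := by
  rw [pvKeys_mk_items]; exact PySem.List.nodup_dedup _

theorem pvContains_mk_items (ys : List (String × String × String × String × String)) (k : String) :
    (PySem.Dict.mk (pvItems ys)).contains k = decide (k ∈ ys.map pvKey) := by
  rw [PySem.Dict.contains_eq_decide_mem_keys, pvKeys_mk_items]
  simp

theorem pvGetD_mk_items {ys : List (String × String × String × String × String)} {k : String}
    (h : k ∈ ys.map pvKey) :
    (PySem.Dict.mk (pvItems ys)).getD k PySem.Dict.empty = PySem.Dict.mk [("atoms", pvGrp ys k)] := by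
  have hmem : (k, PySem.Dict.mk [("atoms", pvGrp ys k)]) ∈ (PySem.Dict.mk (pvItems ys)).items := by
    have : k ∈ PySem.List.dedup (ys.map pvKey) := (PySem.List.mem_dedup _ _).mpr h
    exact List.mem_map_of_mem this
  exact PySem.Dict.getD_of_mem_items _ hmem (pvNodup_keys ys) _

theorem pvItems_append_mem {ys : List (String × String × String × String × String)}
    {a : String × String × String × String × String} (hk : pvKey a ∈ ys.map pvKey) :
    pvItems (ys ++ [a]) = (PySem.List.dedup (ys.map pvKey)).map
      (fun k => (k, PySem.Dict.mk [("atoms", pvGrp (ys ++ [a]) k)])) := by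
  unfold pvItems
  rw [List.map_append, List.map_cons, List.map_nil, pvDedup_append_mem hk]

theorem pvItems_append_not_mem {ys : List (String × String × String × String × String)}
    {a : String × String × String × String × String} (hk : pvKey a ∉ ys.map pvKey) :
    pvItems (ys ++ [a]) = (PySem.List.dedup (ys.map pvKey)).map
      (fun k => (k, PySem.Dict.mk [("atoms", pvGrp (ys ++ [a]) k)]))
      ++ [(pvKey a, PySem.Dict.mk [("atoms", pvGrp (ys ++ [a]) (pvKey a))])] := by
  unfold pvItems
  rw [List.map_append, List.map_cons, List.map_nil, pvDedup_append_not_mem hk, List.map_append]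
  rfl

theorem pvStep_inv (ys : List (String × String × String × String × String))
    (a : String × String × String × String × String) :
    pvStep (PySem.Dict.mk (pvItems ys)) a = PySem.Dict.mk (pvItems (ys ++ [a])) := by
  by_cases hk : pvKey a ∈ ys.map pvKey
  · -- existing key: A takes the modify branch
    have hc : (PySem.Dict.mk (pvItems ys)).contains (pvKey a) = true := by
      rw [pvContains_mk_items]; simpa using hk
    unfold pvStep
    rw [hc]
    simp only [Bool.not_true, Bool.false_eq_true, if_false]
    apply PySem.Dict.ext
    have hnd : ((PySem.Dict.mk (pvItems ys)).modify (pvKey a) PySem.Dict.empty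
        (fun inner => inner.modify "atoms" [] (fun l => l ++ [pvTup a]))).keys.Nodup := by
      rw [PySem.Dict.keys_modify, PySem.Dict.keys_insert_of_contains _ _ hc]
      exact pvNodup_keys ys
    rw [PySem.Dict.items_eq_map_keys _ hnd PySem.Dict.empty, PySem.Dict.keys_modify,
      PySem.Dict.keys_insert_of_contains _ _ hc, pvKeys_mk_items]
    show _ = pvItems (ys ++ [a])
    rw [pvItems_append_mem hk]
    apply List.map_congr_left
    intro k' hk'
    have hk'm : k' ∈ ys.map pvKey := (PySem.List.mem_dedup _ _).mp hk'
    rw [PySem.Dict.getD_modify]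
    by_cases h : k' = pvKey a
    · subst h
      rw [if_pos rfl, pvGetD_mk_items hk'm, pvInnerModify, pvGrp_append, if_pos rfl]
    · rw [if_neg h, pvGetD_mk_items hk'm, pvGrp_append, if_neg (fun he => h he.symm)]
      simp
  · -- fresh key: A takes the insert branch
    have hc : (PySem.Dict.mk (pvItems ys)).contains (pvKey a) = false := by
      rw [pvContains_mk_items]; simpa using hk
    unfold pvStep
    rw [hc]
    simp only [Bool.not_false, if_true]
    apply PySem.Dict.ext
    rw [PySem.Dict.items_insert_of_not_contains _ _ hc, pvOfListSingleton]
    show pvItems ys ++ _ = pvItems (ys ++ [a])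
    rw [pvItems_append_not_mem hk]
    congr 1
    · unfold pvItems
      apply List.map_congr_left
      intro k' hk'
      have hk'm : k' ∈ ys.map pvKey := (PySem.List.mem_dedup _ _).mp hk'
      have hne : pvKey a ≠ k' := fun he => hk (he ▸ hk'm)
      rw [pvGrp_append, if_neg hne]
      simp
    · rw [pvGrp_append, if_pos rfl, pvGrp_nil_of_not_mem hk]
      rfl

theorem pvFoldl_inv (xs ys : List (String × String × String × String × String)) :
    xs.foldl pvStep (PySem.Dict.mk (pvItems ys)) = PySem.Dict.mk (pvItems (ys ++ xs)) := by
  induction xs generalizing ys with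
  | nil => simp
  | cons a xs ih =>
    simp only [List.foldl_cons, pvStep_inv]
    rw [ih (ys ++ [a])]
    simp

-- ===== VERDICT (by name: the statement is the Claim_ definition above) =====
theorem get_merged_reports_spec : Claim_equal_get_merged_reports := by
  intro xs _
  show _ = _
  have h0 : PySem.Dict.empty = PySem.Dict.mk (pvItems ([] : List (String × String × String × String × String))) := by
    simp [pvItems, PySem.Dict.empty, PySem.List.dedup]
  unfold get_merged_reports get_merged_reports_alt
  rw [show (fun (d : PySem.Dict String (PySem.Dict String (List (String × String × String)))) atom =>
      let full_name := PySem.Str.join "." [atom.2.1, atom.2.2.1]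
      if !(d.contains full_name) then
        d.insert full_name (PySem.Dict.ofList [("atoms", [(atom.1, atom.2.2.2.1, atom.2.2.2.2)])])
      else
        d.modify full_name PySem.Dict.empty
          (fun inner => inner.modify "atoms" [] (fun l => l ++ [(atom.1, atom.2.2.2.1, atom.2.2.2.2)]))) = pvStep from rfl]
  rw [h0, pvFoldl_inv xs [], List.nil_append]
  simp only [pvItems, List.map_map]
  rfl
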